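-- pv_equiv track=rewrite | github.com/baudrly/fcgrseq | tests/test_fcgr.py | get_cgr_coords_manual
-- ===== SOURCE A (Python) =====
-- def get_cgr_coords_manual(kmer):
--     """Calculates theoretical CGR coordinates (x, y) for a k-mer (manual for clarity)."""
--     x_coord, y_coord = 0, 0
--     base_map = {'A': (0,0), 'T': (1,0), 'C': (0,1), 'G': (1,1)} # (x_bit, y_bit)
--     for base in kmer:
--         xb, yb = base_map[base]
--         x_coord = (x_coord << 1) | xb
--         y_coord = (y_coord << 1) | yb
--     return x_coord, y_coord
-- ===== SOURCE B (Python) =====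
-- def get_cgr_coords_manual(kmer):
--     """Two-pass rewrite: map bases to bit characters, then parse the binary strings."""
--     xmap = {'A': '0', 'T': '1', 'C': '0', 'G': '1'}
--     ymap = {'A': '0', 'T': '0', 'C': '1', 'G': '1'}
--     xbits = ''.join(xmap[b] for b in kmer)
--     ybits = ''.join(ymap[b] for b in kmer)
--     if not kmer:
--         return (0, 0)
--     return (int(xbits, 2), int(ybits, 2))
-- ===== Notes on version B (the rewrite author's own statement) =====
-- stated objective: simpler
-- what changed: Replaces the single loop maintaining two shifted integer accumulators by two map passes building binary-digit strings that are parsed with int(.,2), with an explicit empty-kmer guard.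
import Mathlib
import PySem

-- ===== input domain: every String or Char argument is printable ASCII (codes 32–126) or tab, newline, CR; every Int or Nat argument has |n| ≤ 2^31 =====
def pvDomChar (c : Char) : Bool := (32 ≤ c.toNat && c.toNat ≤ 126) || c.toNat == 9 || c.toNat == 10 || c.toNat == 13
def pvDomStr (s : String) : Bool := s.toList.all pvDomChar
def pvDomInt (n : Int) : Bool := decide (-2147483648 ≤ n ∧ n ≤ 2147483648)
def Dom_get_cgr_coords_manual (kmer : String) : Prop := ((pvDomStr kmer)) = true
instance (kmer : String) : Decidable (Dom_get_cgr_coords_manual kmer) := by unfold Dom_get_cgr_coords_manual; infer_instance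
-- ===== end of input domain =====

-- B replaces A's single loop over two shifted-integer accumulators by two map passes
-- building binary-digit strings parsed as base-2 integers (objective: simpler decomposition).


-- ===== PORT A =====
-- base_map lookup; Pre_ excludes the KeyError inputs, so getD's default is never reached.
def pvBaseMap : PySem.Dict Char (Int × Int) :=
  PySem.Dict.ofList [('A', (0,0)), ('T', (1,0)), ('C', (0,1)), ('G', (1,1))]

-- x_coord = (x_coord << 1) | xb : since x_coord ≥ 0 and xb ∈ {0,1}, this is exactly 2*x_coord + xb.
def get_cgr_coords_manual (kmer : String) : Int × Int :=
  kmer.toList.foldl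
    (fun (acc : Int × Int) base =>
      let p := PySem.Dict.getD pvBaseMap base (0, 0)
      (2 * acc.1 + p.1, 2 * acc.2 + p.2))
    (0, 0)

-- ===== PORT B =====
def pvXMap : PySem.Dict Char Char := PySem.Dict.ofList [('A', '0'), ('T', '1'), ('C', '0'), ('G', '1')]
def pvYMap : PySem.Dict Char Char := PySem.Dict.ofList [('A', '0'), ('T', '0'), ('C', '1'), ('G', '1')]

-- int(s, 2) on a nonempty string of '0'/'1' digits (guaranteed by Pre_): base-2 fold.
def pvParseBin (l : List Char) : Int :=
  l.foldl (fun a c => 2 * a + (if c = '1' then 1 else 0)) 0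

def get_cgr_coords_manual_alt (kmer : String) : Int × Int :=
  let xbits := kmer.toList.map (fun b => PySem.Dict.getD pvXMap b '0')
  let ybits := kmer.toList.map (fun b => PySem.Dict.getD pvYMap b '0')
  if kmer.toList = [] then (0, 0)
  else (pvParseBin xbits, pvParseBin ybits)

-- ===== PRECONDITION & SPEC =====
-- A raises KeyError on any character other than A/T/C/G; exactly those inputs are excluded.
def Pre_get_cgr_coords_manual (kmer : String) : Prop :=
  (kmer.toList.all (fun c => c == 'A' || c == 'T' || c == 'C' || c == 'G')) = true
instance (kmer : String) : Decidable (Pre_get_cgr_coords_manual kmer) := by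
  unfold Pre_get_cgr_coords_manual; infer_instance

def pvWitness_get_cgr_coords_manual : String := "ATCG"

def Spec_get_cgr_coords_manual (kmer : String) (out : Int × Int) : Prop := out = get_cgr_coords_manual_alt kmer
instance (kmer : String) (out : Int × Int) : Decidable (Spec_get_cgr_coords_manual kmer out) := by unfold Spec_get_cgr_coords_manual; infer_instance

-- ===== CLAIM (what is proved, stated in full; the proofs are below) =====
def Claim_equal_get_cgr_coords_manual : Prop := ∀ (kmer : String), Dom_get_cgr_coords_manual kmer → Pre_get_cgr_coords_manual kmer → Spec_get_cgr_coords_manual kmer (get_cgr_coords_manual kmer)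

-- ===== LEMMAS AND PROOFS =====

-- A's combined fold equals, componentwise, the binary folds of the mapped bit lists.
lemma pv_fold_eq (l : List Char)
    (h : ∀ c ∈ l, c = 'A' ∨ c = 'T' ∨ c = 'C' ∨ c = 'G') :
    ∀ (x y : Int),
      l.foldl (fun (acc : Int × Int) base =>
          let p := PySem.Dict.getD pvBaseMap base (0, 0)
          (2 * acc.1 + p.1, 2 * acc.2 + p.2)) (x, y)
        = ((l.map (fun b => PySem.Dict.getD pvXMap b '0')).foldl
             (fun a c => 2 * a + (if c = '1' then 1 else 0)) x,
           (l.map (fun b => PySem.Dict.getD pvYMap b '0')).foldl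
             (fun a c => 2 * a + (if c = '1' then 1 else 0)) y) := by
  induction l with
  | nil => intro x y; simp
  | cons c t ih =>
    intro x y
    have hc := h c (List.mem_cons_self ..)
    have ht : ∀ c ∈ t, c = 'A' ∨ c = 'T' ∨ c = 'C' ∨ c = 'G' :=
      fun d hd => h d (List.mem_cons_of_mem _ hd)
    have eA : pvBaseMap.getD 'A' (0, 0) = (0, 0) := by decide
    have eT : pvBaseMap.getD 'T' (0, 0) = (1, 0) := by decide
    have eC : pvBaseMap.getD 'C' (0, 0) = (0, 1) := by decide
    have eG : pvBaseMap.getD 'G' (0, 0) = (1, 1) := by decide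
    have xA : pvXMap.getD 'A' '0' = '0' := by decide
    have xT : pvXMap.getD 'T' '0' = '1' := by decide
    have xC : pvXMap.getD 'C' '0' = '0' := by decide
    have xG : pvXMap.getD 'G' '0' = '1' := by decide
    have yA : pvYMap.getD 'A' '0' = '0' := by decide
    have yT : pvYMap.getD 'T' '0' = '0' := by decide
    have yC : pvYMap.getD 'C' '0' = '1' := by decide
    have yG : pvYMap.getD 'G' '0' = '1' := by decide
    rcases hc with rfl | rfl | rfl | rfl <;>
      simp [List.foldl_cons, List.map_cons, ih ht, eA, eT, eC, eG, xA, xT, xC, xG, yA, yT, yC, yG]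

-- ===== VERDICT (by name: the statement is the Claim_ definition above) =====
theorem get_cgr_coords_manual_spec : Claim_equal_get_cgr_coords_manual := by
  intro kmer _ hpre
  unfold Spec_get_cgr_coords_manual get_cgr_coords_manual get_cgr_coords_manual_alt pvParseBin
  unfold Pre_get_cgr_coords_manual at hpre
  rw [List.all_eq_true] at hpre
  replace hpre : ∀ c ∈ kmer.toList, c = 'A' ∨ c = 'T' ∨ c = 'C' ∨ c = 'G' := by
    intro c hc
    have := hpre c hc
    simp only [Bool.or_eq_true, beq_iff_eq] at this
    tauto
  rcases hk : kmer.toList with _ | ⟨c, t⟩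
  · rfl
  · rw [hk] at hpre
    simpa using pv_fold_eq (c :: t) hpre 0 0
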